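-- pv_equiv track=rewrite | github.com/carlos51599/Borehole_Plots_Render | section/parsing.py | validate_ags_format
-- ===== SOURCE A (Python) =====
-- from typing import Tuple, Optional, Dict, List, Any
--
-- def validate_ags_format(content: str) -> Tuple[bool, str]:
--     """
--     Validate basic AGS format compliance.
--
--     Args:
--         content: AGS file content as string
--
--     Returns:
--         tuple: (is_valid, error_message)
--     """
--     try:
--         if not content.strip():
--             return False, "Empty file content"
--
--         lines = content.splitlines()
--
--         # Check for basic AGS structure
--         has_group = any("GROUP" in line for line in lines[:10])
--         has_heading = any("HEADING" in line for line in lines[:20])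
--         has_data = any("DATA" in line for line in lines[:50])
--
--         if not has_group:
--             return False, "No GROUP declarations found - not a valid AGS file"
--
--         if not has_heading:
--             return False, "No HEADING declarations found - invalid AGS structure"
--
--         if not has_data:
--             return False, "No DATA rows found - file appears to be empty"
--
--         # Check for required groups
--         required_groups = ["LOCA"]
--         found_groups = []
--
--         for line in lines:
--             if "GROUP" in line and "LOCA" in line:
--                 found_groups.append("LOCA")
--                 break
--
--         missing_groups = [
--             group for group in required_groups if group not in found_groups
--         ]
--         if missing_groups:
--             return False, f"Missing required AGS groups: {', '.join(missing_groups)}"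
--
--         return True, "Valid AGS format"
--
--     except Exception as e:
--         return False, f"Error validating AGS format: {e}"
-- ===== SOURCE B (Python) =====
-- def validate_ags_format(content: str):
--     """Single-pass flag scan over enumerate(lines) instead of three slice scans + a LOCA loop."""
--     if not content.strip():
--         return False, "Empty file content"
--     has_group = has_heading = has_data = has_loca = False
--     for i, line in enumerate(content.splitlines()):
--         if i < 10 and "GROUP" in line:
--             has_group = True
--         if i < 20 and "HEADING" in line:
--             has_heading = True
--         if i < 50 and "DATA" in line:
--             has_data = True
--         if "GROUP" in line and "LOCA" in line:
--             has_loca = True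
--     if not has_group:
--         return False, "No GROUP declarations found - not a valid AGS file"
--     if not has_heading:
--         return False, "No HEADING declarations found - invalid AGS structure"
--     if not has_data:
--         return False, "No DATA rows found - file appears to be empty"
--     if not has_loca:
--         return False, "Missing required AGS groups: LOCA"
--     return True, "Valid AGS format"
-- ===== Notes on version B (the rewrite author's own statement) =====
-- stated objective: alternative
-- what changed: Replaced the three separate prefix any() scans over lines[:10]/[:20]/[:50] and the separate LOCA search loop by one single pass over enumerate(lines) that maintains four boolean flags, dropped the redundant required_groups/found_groups list machinery in favour of a has_loca flag, and dropped the unreachable try/except.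
import Mathlib
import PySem

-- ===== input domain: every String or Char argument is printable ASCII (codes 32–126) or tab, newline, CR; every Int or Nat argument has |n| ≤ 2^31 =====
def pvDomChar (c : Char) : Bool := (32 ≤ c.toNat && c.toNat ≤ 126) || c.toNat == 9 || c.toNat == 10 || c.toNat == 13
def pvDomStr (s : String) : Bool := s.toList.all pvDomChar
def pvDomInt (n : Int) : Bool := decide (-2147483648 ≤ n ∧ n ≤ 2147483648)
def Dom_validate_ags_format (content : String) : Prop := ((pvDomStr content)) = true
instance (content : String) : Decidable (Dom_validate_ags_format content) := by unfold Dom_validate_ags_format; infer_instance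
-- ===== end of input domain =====

-- B replaces A's three prefix any() scans and LOCA loop by one single pass keeping four flags; same results, same cost (objective: alternative).

-- ===== PORT A =====
-- the 'for line in lines: if … append; break' loop of A
def pvFindLoca : List String → List String
  | [] => []
  | line :: rest =>
    if PySem.Str.isIn "GROUP" line && PySem.Str.isIn "LOCA" line then ["LOCA"]
    else pvFindLoca rest

def validate_ags_format (content : String) : Bool × String :=
  if PySem.Str.strip content = "" then (false, "Empty file content")
  else
    let lines := PySem.Str.splitlines content
    let has_group := (PySem.List.slice lines none (some 10)).any (fun line => PySem.Str.isIn "GROUP" line)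
    let has_heading := (PySem.List.slice lines none (some 20)).any (fun line => PySem.Str.isIn "HEADING" line)
    let has_data := (PySem.List.slice lines none (some 50)).any (fun line => PySem.Str.isIn "DATA" line)
    if !has_group then (false, "No GROUP declarations found - not a valid AGS file")
    else if !has_heading then (false, "No HEADING declarations found - invalid AGS structure")
    else if !has_data then (false, "No DATA rows found - file appears to be empty")
    else
      let required_groups := ["LOCA"]
      let found_groups := pvFindLoca lines
      let missing_groups := required_groups.filter (fun g => !(decide (g ∈ found_groups)))
      if !missing_groups.isEmpty then
        (false, "Missing required AGS groups: " ++ PySem.Str.join ", " missing_groups)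
      else (true, "Valid AGS format")

-- ===== PORT B =====
-- one step of B's single pass: update the four flags from (index, line)
def pvStep (f : Bool × Bool × Bool × Bool) (p : Int × String) : Bool × Bool × Bool × Bool :=
  (f.1 || (decide (p.1 < 10) && PySem.Str.isIn "GROUP" p.2),
   f.2.1 || (decide (p.1 < 20) && PySem.Str.isIn "HEADING" p.2),
   f.2.2.1 || (decide (p.1 < 50) && PySem.Str.isIn "DATA" p.2),
   f.2.2.2 || (PySem.Str.isIn "GROUP" p.2 && PySem.Str.isIn "LOCA" p.2))

def validate_ags_format_alt (content : String) : Bool × String :=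
  if PySem.Str.strip content = "" then (false, "Empty file content")
  else
    let f := (PySem.List.enumerate (PySem.Str.splitlines content) 0).foldl pvStep
               (false, false, false, false)
    if !f.1 then (false, "No GROUP declarations found - not a valid AGS file")
    else if !f.2.1 then (false, "No HEADING declarations found - invalid AGS structure")
    else if !f.2.2.1 then (false, "No DATA rows found - file appears to be empty")
    else if !f.2.2.2 then (false, "Missing required AGS groups: LOCA")
    else (true, "Valid AGS format")

-- ===== PRECONDITION & SPEC =====
def Spec_validate_ags_format (content : String) (out : Bool × String) : Prop := out = validate_ags_format_alt content
instance (content : String) (out : Bool × String) : Decidable (Spec_validate_ags_format content out) := by unfold Spec_validate_ags_format; infer_instance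

-- ===== CLAIM (what is proved, stated in full; the proofs are below) =====
def Claim_equal_validate_ags_format : Prop := ∀ (content : String), Dom_validate_ags_format content → Spec_validate_ags_format content (validate_ags_format content)

-- ===== LEMMAS AND PROOFS =====

-- a bounded-index any over an enumeration is an any over a prefix
lemma any_enumerate_lt (l : List String) (s n : Int) (P : String → Bool) :
    (PySem.List.enumerate l s).any (fun p => decide (p.1 < n) && P p.2)
      = (l.take (n - s).toNat).any P := by
  induction l generalizing s with
  | nil => simp [PySem.List.enumerate_nil]
  | cons x xs ih =>
    rw [PySem.List.enumerate_cons]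
    by_cases h : s < n
    · have : (n - s).toNat = (n - (s + 1)).toNat + 1 := by omega
      simp [this, ih, h]
    · have h0 : (n - s).toNat = 0 := by omega
      have h1 : (n - (s + 1)).toNat = 0 := by omega
      simp [h0, h1, ih, h]

lemma any_enumerate_snd (l : List String) (s : Int) (Q : String → Bool) :
    (PySem.List.enumerate l s).any (fun p => Q p.2) = l.any Q := by
  induction l generalizing s with
  | nil => simp [PySem.List.enumerate_nil]
  | cons x xs ih => simp [PySem.List.enumerate_cons, ih]

-- B's fold computes exactly the four any-queries
lemma foldl_pvStep (l : List String) (s : Int) (a b c d : Bool) :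
    (PySem.List.enumerate l s).foldl pvStep (a, b, c, d)
      = (a || (PySem.List.enumerate l s).any (fun p => decide (p.1 < 10) && PySem.Str.isIn "GROUP" p.2),
         b || (PySem.List.enumerate l s).any (fun p => decide (p.1 < 20) && PySem.Str.isIn "HEADING" p.2),
         c || (PySem.List.enumerate l s).any (fun p => decide (p.1 < 50) && PySem.Str.isIn "DATA" p.2),
         d || (PySem.List.enumerate l s).any (fun p => PySem.Str.isIn "GROUP" p.2 && PySem.Str.isIn "LOCA" p.2)) := by
  induction l generalizing s a b c d with
  | nil => simp [PySem.List.enumerate_nil]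
  | cons x xs ih =>
    simp only [PySem.List.enumerate_cons, List.foldl_cons, List.any_cons]
    rw [ih]
    simp [pvStep, Bool.or_assoc]

-- A's LOCA loop returns ["LOCA"] iff some line mentions both GROUP and LOCA
lemma pvFindLoca_eq (l : List String) :
    pvFindLoca l = if l.any (fun line => PySem.Str.isIn "GROUP" line && PySem.Str.isIn "LOCA" line)
                   then ["LOCA"] else [] := by
  induction l with
  | nil => simp [pvFindLoca]
  | cons x xs ih =>
    rw [pvFindLoca, List.any_cons, ih]
    cases h : (PySem.Str.isIn "GROUP" x && PySem.Str.isIn "LOCA" x) <;> simp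

-- ===== VERDICT (by name: the statement is the Claim_ definition above) =====
theorem validate_ags_format_spec : Claim_equal_validate_ags_format := by
  intro content _
  unfold Spec_validate_ags_format validate_ags_format validate_ags_format_alt
  by_cases hs : PySem.Str.strip content = ""
  · simp [hs]
  · simp only [hs, if_false]
    set lines := PySem.Str.splitlines content with hl
    rw [foldl_pvStep, any_enumerate_lt, any_enumerate_lt, any_enumerate_lt,
        any_enumerate_snd (Q := fun line => PySem.Str.isIn "GROUP" line && PySem.Str.isIn "LOCA" line), pvFindLoca_eq]
    norm_num [PySem.List.slice_to]
    split_ifs with h1 h2 h3 h4 <;> try rfl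
    have hne : ¬ ∃ x ∈ lines, PySem.Chars.isIn "GROUP".toList x.toList = true ∧
        PySem.Chars.isIn "LOCA".toList x.toList = true := by
      rintro ⟨x, hx, hG, hL⟩
      rw [h4 x hx hG] at hL
      exact Bool.false_ne_true hL
    simp only [show ("GROUP".toList) = ['G','R','O','U','P'] from rfl,
               show ("LOCA".toList) = ['L','O','C','A'] from rfl] at hne
    simp [hne]
    decide
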